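-- pv_equiv track=rewrite | github.com/Deng-GuiFeng/multichannel-asr | VAD_split_audio.py | merge_and_filter_segments
-- ===== SOURCE A (Python) =====
-- from typing import List, Tuple, Dict
--
-- def merge_and_filter_segments(segments: List[Tuple[int, int]], params: Dict) -> List[Tuple[int, int]]:
--     """合并相邻片段并过滤短片段
--     参数：
--         segments - 原始检测得到的语音段列表
--         params - 合并与过滤参数字典（包含 'merge_gap_ms' 和 'min_length_ms'）
--     返回：
--         合并并过滤后的语音段列表，每个元素为 (start_ms, end_ms)
--     说明：
--         先合并相邻时间间隔小于 merge_gap_ms 的片段，再过滤掉总时长小于 min_length_ms 的片段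
--     """
--     if not segments:
--         return []
--
--     # 合并相邻语音段
--     merged = [list(segments[0])]
--     for s, e in segments[1:]:
--         if s - merged[-1][1] <= params['merge_gap_ms']:
--             merged[-1][1] = e
--         else:
--             merged.append([s, e])
--
--     # 过滤掉太短的片段
--     return [(s, e) for s, e in merged if (e - s) >= params['min_length_ms']]
-- ===== SOURCE B (Python) =====
-- def merge_and_filter_segments(segments, params):
--     if not segments:
--         return []
--     n = len(segments)
--     # cut positions: 0, every index whose gap to its predecessor exceeds merge_gap_ms, and n
--     cuts = [0] + [i for i in range(1, n)
--                   if segments[i][0] - segments[i - 1][1] > params['merge_gap_ms']] + [n]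
--     # one merged segment per index range between consecutive cuts, filtered by length
--     return [(segments[a][0], segments[b - 1][1])
--             for a, b in zip(cuts, cuts[1:])
--             if segments[b - 1][1] - segments[a][0] >= params['min_length_ms']]
-- ===== Notes on version B (the rewrite author's own statement) =====
-- stated objective: alternative
-- what changed: Replaces A's mutate-the-last-merged-element pass plus filter with a staged index computation: first the list of cut indices where the inter-segment gap exceeds merge_gap_ms, then one (start,end) pair per index range between consecutive cuts, filtered by length.
import Mathlib
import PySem

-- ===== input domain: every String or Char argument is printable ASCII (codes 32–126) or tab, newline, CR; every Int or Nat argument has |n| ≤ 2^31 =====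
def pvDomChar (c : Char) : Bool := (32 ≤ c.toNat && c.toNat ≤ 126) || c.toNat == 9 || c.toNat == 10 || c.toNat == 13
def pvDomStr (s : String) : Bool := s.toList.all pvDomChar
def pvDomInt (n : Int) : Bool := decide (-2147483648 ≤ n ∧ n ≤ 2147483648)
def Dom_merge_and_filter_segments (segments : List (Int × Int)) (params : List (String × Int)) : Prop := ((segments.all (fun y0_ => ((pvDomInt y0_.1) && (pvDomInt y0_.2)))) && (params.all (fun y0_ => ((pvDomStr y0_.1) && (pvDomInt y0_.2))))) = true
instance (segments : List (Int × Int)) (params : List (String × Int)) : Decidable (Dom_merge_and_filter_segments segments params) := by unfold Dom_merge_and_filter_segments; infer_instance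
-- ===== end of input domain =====

-- One honest line: B replaces A's mutate-last-merged-element pass + filter by a staged index
-- computation (cut indices where the gap is too large, then one pair per index range);
-- objective: alternative, same cost.

-- ===== PORT A =====
-- A builds `merged` by mutating its last element; we keep `merged` REVERSED in the fold
-- accumulator so 'merged[-1]' is the head, then reverse and filter, exactly A's two phases.
def mafsStepA (gap : Int) (acc : List (Int × Int)) (se : Int × Int) : List (Int × Int) :=
  match acc with
  | (ms, me) :: rest =>
      if se.1 - me ≤ gap then (ms, se.2) :: rest else se :: (ms, me) :: rest
  | [] => [se]  -- unreachable: acc starts nonempty and never shrinks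

def merge_and_filter_segments (segments : List (Int × Int)) (params : List (String × Int)) : List (Int × Int) :=
  match segments with
  | [] => []
  | first :: rest =>
      -- params['...']: first-match lookup; Pre_ guarantees presence wherever Python reads it
      let gap := (List.lookup "merge_gap_ms" params).getD 0
      let minl := (List.lookup "min_length_ms" params).getD 0
      let merged := (rest.foldl (mafsStepA gap) [first]).reverse
      merged.filter (fun se => decide (se.2 - se.1 ≥ minl))

-- ===== PORT B =====
-- range(1, n) with nonnegative bounds is ported as List.range' 1 (n-1); segments[i] with an
-- in-range nonnegative index is ported as List.getD (exact there).
def merge_and_filter_segments_alt (segments : List (Int × Int)) (params : List (String × Int)) : List (Int × Int) :=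
  match segments with
  | [] => []
  | _ :: _ =>
      let n := segments.length
      let cuts := 0 :: ((List.range' 1 (n - 1)).filter
          (fun i => decide ((segments.getD i (0, 0)).1 - (segments.getD (i - 1) (0, 0)).2
            > (List.lookup "merge_gap_ms" params).getD 0))) ++ [n]
      ((cuts.zip cuts.tail).filter
          (fun ab => decide ((segments.getD (ab.2 - 1) (0, 0)).2 - (segments.getD ab.1 (0, 0)).1
            ≥ (List.lookup "min_length_ms" params).getD 0))).map
        (fun ab => ((segments.getD ab.1 (0, 0)).1, (segments.getD (ab.2 - 1) (0, 0)).2))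

-- ===== PRECONDITION & SPEC =====
-- Pre_ excludes exactly the KeyError inputs: with segments nonempty Python reads
-- 'min_length_ms', and with two or more segments also 'merge_gap_ms'.
def Pre_merge_and_filter_segments (segments : List (Int × Int)) (params : List (String × Int)) : Prop :=
  segments = [] ∨ (List.lookup "min_length_ms" params ≠ none ∧
    (segments.length ≤ 1 ∨ List.lookup "merge_gap_ms" params ≠ none))
instance (segments : List (Int × Int)) (params : List (String × Int)) : Decidable (Pre_merge_and_filter_segments segments params) := by unfold Pre_merge_and_filter_segments; infer_instance

def pvWitness_merge_and_filter_segments : (List (Int × Int)) × (List (String × Int)) :=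
  ([(0, 30), (35, 50), (200, 205)], [("merge_gap_ms", 10), ("min_length_ms", 20)])

def Spec_merge_and_filter_segments (segments : List (Int × Int)) (params : List (String × Int)) (out : List (Int × Int)) : Prop := out = merge_and_filter_segments_alt segments params
instance (segments : List (Int × Int)) (params : List (String × Int)) (out : List (Int × Int)) : Decidable (Spec_merge_and_filter_segments segments params out) := by unfold Spec_merge_and_filter_segments; infer_instance

-- ===== CLAIM (what is proved, stated in full; the proofs are below) =====
def Claim_equal_merge_and_filter_segments : Prop := ∀ (segments : List (Int × Int)) (params : List (String × Int)), Dom_merge_and_filter_segments segments params → Pre_merge_and_filter_segments segments params → Spec_merge_and_filter_segments segments params (merge_and_filter_segments segments params)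

-- ===== LEMMAS AND PROOFS =====
-- Proof-side reference: the merged-and-filtered output as a single structural recursion,
-- holding the pending segment as two scalars. Both ports are proved equal to it.
def mafsRef (gap minl cs ce : Int) : List (Int × Int) → List (Int × Int)
  | [] => if ce - cs ≥ minl then [(cs, ce)] else []
  | (s, e) :: rest =>
      if s - ce ≤ gap then mafsRef gap minl cs e rest
      else if ce - cs ≥ minl then (cs, ce) :: mafsRef gap minl s e rest
      else mafsRef gap minl s e rest

-- B's second stage as a named function of the cut list.
def mafsEmit (xs : List (Int × Int)) (minl : Int) (cuts : List Nat) : List (Int × Int) :=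
  ((cuts.zip cuts.tail).filter
      (fun ab => decide ((xs.getD (ab.2 - 1) (0, 0)).2 - (xs.getD ab.1 (0, 0)).1 ≥ minl))).map
    (fun ab => ((xs.getD ab.1 (0, 0)).1, (xs.getD (ab.2 - 1) (0, 0)).2))

theorem mafsEmit_cons₂ (xs : List (Int × Int)) (minl : Int) (a b : Nat) (l : List Nat) :
    mafsEmit xs minl (a :: b :: l)
      = (if (xs.getD (b - 1) (0, 0)).2 - (xs.getD a (0, 0)).1 ≥ minl
          then [((xs.getD a (0, 0)).1, (xs.getD (b - 1) (0, 0)).2)] else [])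
        ++ mafsEmit xs minl (b :: l) := by
  simp only [mafsEmit, List.tail_cons, List.zip_cons_cons, List.filter_cons]
  by_cases h : (xs.getD (b - 1) (0, 0)).2 - (xs.getD a (0, 0)).1 ≥ minl
  · rw [if_pos (decide_eq_true h), if_pos h]; simp
  · rw [if_neg (by simpa using h), if_neg h]; simp

theorem mafsEmit_pair (xs : List (Int × Int)) (minl : Int) (a b : Nat) :
    mafsEmit xs minl [a, b]
      = (if (xs.getD (b - 1) (0, 0)).2 - (xs.getD a (0, 0)).1 ≥ minl
          then [((xs.getD a (0, 0)).1, (xs.getD (b - 1) (0, 0)).2)] else []) := by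
  simp only [mafsEmit, List.tail_cons, List.zip_cons_cons, List.zip_nil_right,
    List.filter_cons, List.filter_nil]
  by_cases h : (xs.getD (b - 1) (0, 0)).2 - (xs.getD a (0, 0)).1 ≥ minl
  · rw [if_pos (decide_eq_true h), if_pos h]; simp
  · rw [if_neg (by simpa using h), if_neg h]; simp

-- Invariant relating A's (reversed-accumulator fold, then reverse+filter) to the reference.
theorem mafs_key (gap minl : Int) (t : List (Int × Int)) :
    ∀ (cs ce : Int) (acc : List (Int × Int)),
      ((t.foldl (mafsStepA gap) ((cs, ce) :: acc)).reverse).filter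
          (fun se => decide (se.2 - se.1 ≥ minl))
        = (acc.reverse.filter (fun se => decide (se.2 - se.1 ≥ minl))) ++ mafsRef gap minl cs ce t := by
  induction t with
  | nil =>
      intro cs ce acc
      by_cases hp : ce - cs ≥ minl <;>
        simp [mafsRef, List.filter_append, hp]
  | cons hd tl ih =>
      intro cs ce acc
      obtain ⟨s, e⟩ := hd
      by_cases h : s - ce ≤ gap
      · simp [List.foldl_cons, mafsStepA, h, mafsRef, ih]
      · simp only [List.foldl_cons, mafsStepA, if_neg h]
        rw [ih s e ((cs, ce) :: acc)]
        simp only [mafsRef, if_neg h, List.reverse_cons, List.filter_append, List.append_assoc]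
        by_cases h2 : ce - cs ≥ minl <;> simp [h2]

-- B's staged cut computation equals the reference: induction on the number of indices left.
theorem mafs_cuts (xs : List (Int × Int)) (gap minl : Int) :
    ∀ (m j k : Nat), j + m = xs.length → 1 ≤ j →
      mafsRef gap minl (xs.getD k (0, 0)).1 (xs.getD (j - 1) (0, 0)).2 (xs.drop j)
        = mafsEmit xs minl (k :: (List.range' j m).filter
            (fun i => decide ((xs.getD i (0, 0)).1 - (xs.getD (i - 1) (0, 0)).2 > gap))
            ++ [xs.length]) := by
  intro m
  induction m with
  | zero =>
      intro j k hj _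
      have hjn : j = xs.length := by omega
      subst hjn
      rw [List.drop_length]
      simp only [List.range'_zero, List.filter_nil]
      rw [List.singleton_append, mafsEmit_pair]
      rfl
  | succ m ih =>
      intro j k hj h1
      have hjlt : j < xs.length := by omega
      have hget : xs.getD j (0, 0) = xs[j] := List.getD_eq_getElem xs (0, 0) hjlt
      rcases hxe : xs[j] with ⟨s, e⟩
      have hdrop : xs.drop j = (s, e) :: xs.drop (j + 1) := by
        rw [List.drop_eq_getElem_cons hjlt, hxe]
      have hs : (xs.getD j (0, 0)).1 = s := by rw [hget, hxe]
      have hge : (xs.getD j (0, 0)).2 = e := by rw [hget, hxe]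
      rw [hdrop, List.range'_succ, List.filter_cons]
      by_cases h : s - (xs.getD (j - 1) (0, 0)).2 ≤ gap
      · have hc : ¬ ((xs.getD j (0, 0)).1 - (xs.getD (j - 1) (0, 0)).2 > gap) := by
          rw [hs]; omega
        rw [if_neg (by simpa using hc)]
        simp only [mafsRef, if_pos h]
        have hrec := ih (j + 1) k (by omega) (by omega)
        rw [Nat.add_sub_cancel, hget, hxe] at hrec
        exact hrec
      · have hc : (xs.getD j (0, 0)).1 - (xs.getD (j - 1) (0, 0)).2 > gap := by
          rw [hs]; omega
        rw [if_pos (decide_eq_true hc)]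
        simp only [mafsRef, if_neg h]
        rw [List.cons_append, List.cons_append]
        rw [mafsEmit_cons₂ xs minl k j]
        have hrec := ih (j + 1) j (by omega) (by omega)
        rw [Nat.add_sub_cancel, hget, hxe, List.cons_append] at hrec
        rw [hrec]
        by_cases h2 : (xs.getD (j - 1) (0, 0)).2 - (xs.getD k (0, 0)).1 ≥ minl
        · rw [if_pos h2, if_pos h2]; simp
        · rw [if_neg h2, if_neg h2]; simp

-- ===== VERDICT (by name: the statement is the Claim_ definition above) =====
theorem merge_and_filter_segments_spec : Claim_equal_merge_and_filter_segments := by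
  intro segments params _ _
  unfold Spec_merge_and_filter_segments
  match segments with
  | [] => rfl
  | (s0, e0) :: rest =>
      have hA := mafs_key ((List.lookup "merge_gap_ms" params).getD 0)
        ((List.lookup "min_length_ms" params).getD 0) rest s0 e0 []
      have hB := mafs_cuts ((s0, e0) :: rest)
        ((List.lookup "merge_gap_ms" params).getD 0)
        ((List.lookup "min_length_ms" params).getD 0)
        rest.length 1 0 (by simp; omega) (le_refl 1)
      simp only [List.nil_append, List.filter_nil, List.reverse_nil] at hA
      simp only [merge_and_filter_segments, merge_and_filter_segments_alt,
        mafsEmit, List.getD, List.drop_one, List.tail_cons, List.getElem?_cons_zero,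
        Option.getD_some, Nat.sub_self, List.length_cons, Nat.add_sub_cancel] at hA hB ⊢
      rw [hA, hB]
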